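-- pv_equiv track=rewrite | github.com/Kon-Tact/FuriousScrapping | reconcile_remaining_and_merge.py | union_keep_order
-- ===== SOURCE A (Python) =====
-- from typing import List, Dict, Any
--
-- def union_keep_order(primary: List[Any], secondary: List[Any]) -> List[Any]:
--     out, seen = [], set()
--     for v in (primary or []):
--         if v not in seen:
--             seen.add(v); out.append(v)
--     for v in (secondary or []):
--         if v not in seen:
--             seen.add(v); out.append(v)
--     return out
-- ===== SOURCE B (Python) =====
-- from typing import List, Any
--
-- def union_keep_order(primary: List[Any], secondary: List[Any]) -> List[Any]:
--     # Head-and-filter: repeatedly emit the first element of what remains,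
--     # then delete every later copy of it by filtering; no seen-set, no dict.
--     rest = (primary or []) + (secondary or [])
--     out = []
--     while rest:
--         x = rest[0]
--         out.append(x)
--         rest = [y for y in rest[1:] if y != x]
--     return out
-- ===== Notes on version B (the rewrite author's own statement) =====
-- stated objective: alternative
-- what changed: Replaces A's seen-set accumulation with a head-and-filter nub: concatenate once, then repeatedly emit the head of the remainder and filter out all its later duplicates; no seen-set, no membership test against an accumulator.
import Mathlib
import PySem

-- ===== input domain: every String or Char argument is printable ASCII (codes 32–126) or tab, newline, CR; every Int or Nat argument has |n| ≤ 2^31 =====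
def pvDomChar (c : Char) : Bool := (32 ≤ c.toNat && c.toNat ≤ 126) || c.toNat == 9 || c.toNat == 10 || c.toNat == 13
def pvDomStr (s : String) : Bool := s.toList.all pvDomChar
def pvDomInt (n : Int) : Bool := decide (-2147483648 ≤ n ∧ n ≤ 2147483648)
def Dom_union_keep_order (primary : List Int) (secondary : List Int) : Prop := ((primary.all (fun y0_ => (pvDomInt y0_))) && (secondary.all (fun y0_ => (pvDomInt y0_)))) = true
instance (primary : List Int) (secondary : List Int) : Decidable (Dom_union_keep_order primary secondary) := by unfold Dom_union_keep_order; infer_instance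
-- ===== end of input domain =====

-- B replaces A's seen-set accumulation with a head-and-filter nub over the single concatenation (alternative decomposition; same result).


-- ===== PORT A =====
-- loop body of A: if v not in seen: seen.add(v); out.append(v)
def ukoStep (st : List Int × PySem.Set Int) (v : Int) : List Int × PySem.Set Int :=
  if PySem.Set.contains st.2 v then st else (st.1 ++ [v], PySem.Set.add st.2 v)

-- A: two explicit loops over (primary or []) and (secondary or []) with an out list and a seen set
def union_keep_order (primary : List Int) (secondary : List Int) : List Int :=
  let st1 := primary.foldl ukoStep ([], PySem.Set.empty)
  let st2 := secondary.foldl ukoStep st1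
  st2.1

-- ===== PORT B =====
-- B's while loop: emit the head of the remainder, filter its later duplicates out
def ukoAltLoop : List Int → List Int
  | [] => []
  | x :: rest =>
      have : (rest.filter (fun y => y != x)).length < rest.length + 1 :=
        Nat.lt_succ_of_le (List.length_filter_le _ _)
      x :: ukoAltLoop (rest.filter (fun y => y != x))
termination_by xs => xs.length

-- B: rest = (primary or []) + (secondary or []); then the head-and-filter loop
def union_keep_order_alt (primary : List Int) (secondary : List Int) : List Int :=
  ukoAltLoop (primary ++ secondary)

-- ===== PRECONDITION & SPEC =====
def Spec_union_keep_order (primary : List Int) (secondary : List Int) (out : List Int) : Prop := out = union_keep_order_alt primary secondary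
instance (primary : List Int) (secondary : List Int) (out : List Int) : Decidable (Spec_union_keep_order primary secondary out) := by unfold Spec_union_keep_order; infer_instance

-- ===== CLAIM (what is proved, stated in full; the proofs are below) =====
def Claim_equal_union_keep_order : Prop := ∀ (primary : List Int) (secondary : List Int), Dom_union_keep_order primary secondary → Spec_union_keep_order primary secondary (union_keep_order primary secondary)

-- ===== LEMMAS AND PROOFS =====

-- A's loop keeps out and seen equal as lists; each step is exactly PySem.Set.add
theorem ukoStep_foldl (xs : List Int) (s : List Int) :
    xs.foldl ukoStep (s, s) = (xs.foldl PySem.Set.add s, xs.foldl PySem.Set.add s) := by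
  induction xs generalizing s with
  | nil => rfl
  | cons v xs ih =>
      simp only [List.foldl_cons, ukoStep, PySem.Set.add]
      by_cases h : v ∈ s
      · simp [PySem.Set.contains, h]
        exact ih s
      · simp [PySem.Set.contains, h]
        exact ih (s ++ [v])

-- filtering out an element already in the accumulator does not change the fold
theorem foldl_add_filter (xs : List Int) (acc : List Int) (x : Int) (hx : x ∈ acc) :
    (xs.filter (fun y => y != x)).foldl PySem.Set.add acc = xs.foldl PySem.Set.add acc := by
  induction xs generalizing acc with
  | nil => rfl
  | cons y xs ih =>
      by_cases h : y = x
      · subst h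
        have : PySem.Set.add acc y = acc := by
          simp [PySem.Set.add, PySem.Set.contains, hx]
        simp [this, ih acc hx]
      · have hx' : x ∈ PySem.Set.add acc y := by
          simp [PySem.Set.add, PySem.Set.contains]
          split <;> simp [hx]
        simp [h, ih (PySem.Set.add acc y) hx']

-- a head element absent from the fold's input stays in front of the accumulator
theorem foldl_add_cons (ys : List Int) (acc : List Int) (x : Int) (hx : x ∉ ys) :
    ys.foldl PySem.Set.add (x :: acc) = x :: ys.foldl PySem.Set.add acc := by
  induction ys generalizing acc with
  | nil => rfl
  | cons y ys ih =>
      have hyx : y ≠ x := fun h => hx (h ▸ List.mem_cons_self)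
      have hx' : x ∉ ys := fun h => hx (List.mem_cons_of_mem _ h)
      have hmem : y ∈ x :: acc ↔ y ∈ acc := by simp [hyx]
      by_cases h : y ∈ acc
      · have h1 : PySem.Set.add (x :: acc) y = x :: acc := by
          simp [PySem.Set.add, PySem.Set.contains, hmem.mpr h]
        have h2 : PySem.Set.add acc y = acc := by
          simp [PySem.Set.add, PySem.Set.contains, h]
        simp only [List.foldl_cons, h1, h2]
        exact ih acc hx'
      · have h1 : PySem.Set.add (x :: acc) y = x :: (acc ++ [y]) := by
          simp [PySem.Set.add, PySem.Set.contains, hmem, h]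
        have h2 : PySem.Set.add acc y = acc ++ [y] := by
          simp [PySem.Set.add, PySem.Set.contains, h]
        simp only [List.foldl_cons, h1, h2]
        exact ih (acc ++ [y]) hx'

-- B's loop computes the same keep-first dedup as A's seen-set fold
theorem ukoAltLoop_eq_foldl_aux : ∀ (n : Nat) (xs : List Int), xs.length ≤ n →
    ukoAltLoop xs = xs.foldl PySem.Set.add [] := by
  intro n
  induction n with
  | zero =>
      intro xs h
      have : xs = [] := List.eq_nil_of_length_eq_zero (Nat.le_zero.mp h)
      subst this; simp [ukoAltLoop]
  | succ n ih =>
      intro xs h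
      match xs with
      | [] => simp [ukoAltLoop]
      | x :: rest =>
        have hlen : (rest.filter (fun y => y != x)).length ≤ n :=
          le_trans (List.length_filter_le _ _) (Nat.lt_succ_iff.mp h)
        have hnotin : x ∉ rest.filter (fun y => y != x) := by
          intro hmem
          have := (List.mem_filter.mp hmem).2
          simp at this
        have hstep : PySem.Set.add ([] : List Int) x = [x] := by
          simp [PySem.Set.add, PySem.Set.contains]
        calc ukoAltLoop (x :: rest)
            = x :: ukoAltLoop (rest.filter (fun y => y != x)) := by rw [ukoAltLoop]
          _ = x :: (rest.filter (fun y => y != x)).foldl PySem.Set.add [] := by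
              rw [ih _ hlen]
          _ = (rest.filter (fun y => y != x)).foldl PySem.Set.add [x] :=
              (foldl_add_cons _ [] x hnotin).symm
          _ = rest.foldl PySem.Set.add [x] :=
              foldl_add_filter rest [x] x (List.mem_singleton.mpr rfl)
          _ = (x :: rest).foldl PySem.Set.add [] := by
              rw [List.foldl_cons, hstep]

theorem ukoAltLoop_eq_foldl (xs : List Int) :
    ukoAltLoop xs = xs.foldl PySem.Set.add [] :=
  ukoAltLoop_eq_foldl_aux xs.length xs (le_refl _)

-- ===== VERDICT (by name: the statement is the Claim_ definition above) =====
theorem union_keep_order_spec : Claim_equal_union_keep_order := by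
  intro primary secondary _
  unfold Spec_union_keep_order union_keep_order union_keep_order_alt
  show (secondary.foldl ukoStep (primary.foldl ukoStep ([], PySem.Set.empty))).1 =
    ukoAltLoop (primary ++ secondary)
  have hmt : PySem.Set.empty = ([] : List Int) := rfl
  rw [hmt, ukoStep_foldl, ukoStep_foldl, ukoAltLoop_eq_foldl, List.foldl_append]
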